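-- pv_equiv track=rewrite | github.com/AutoclickerI/Baekjoon | 백준/Bronze/28760. Набор текста/Набор текста.py | min_key_presses
-- ===== SOURCE A (Python) =====
-- def min_key_presses(n, text):
--     presses = 0
--     shift_on = False  # Флаг, указывающий на то, включен ли Shift
--
--     for char in text:
--         if char.isupper() or char in "!?$()":
--             if not shift_on:  # Если Shift не включен, а его нужно включить
--                 presses += 1
--                 shift_on = True
--             presses += 1  # Нажатие для самого символа
--         else:
--             if char!=' ':  # Нужно отключить Shift
--                 shift_on = False
--             presses += 1  # Нажатие для самого символа
--
--     return presses
-- ===== SOURCE B (Python) =====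
-- from itertools import groupby
--
-- def min_key_presses(n, text):
--     is_shift_char = lambda c: c.isupper() or c in "!?$()"
--     shift_presses = sum(k for k, _ in groupby((c for c in text if c != ' '), key=is_shift_char))
--     return len(text) + shift_presses
-- ===== Notes on version B (the rewrite author's own statement) =====
-- stated objective: alternative
-- what changed: Replaces A's per-character shift_on toggle loop by a counting decomposition: the answer is len(text) plus the number of maximal runs of shift-requiring characters (isupper or in "!?$()") among the non-space characters, computed with itertools.groupby.
import Mathlib
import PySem

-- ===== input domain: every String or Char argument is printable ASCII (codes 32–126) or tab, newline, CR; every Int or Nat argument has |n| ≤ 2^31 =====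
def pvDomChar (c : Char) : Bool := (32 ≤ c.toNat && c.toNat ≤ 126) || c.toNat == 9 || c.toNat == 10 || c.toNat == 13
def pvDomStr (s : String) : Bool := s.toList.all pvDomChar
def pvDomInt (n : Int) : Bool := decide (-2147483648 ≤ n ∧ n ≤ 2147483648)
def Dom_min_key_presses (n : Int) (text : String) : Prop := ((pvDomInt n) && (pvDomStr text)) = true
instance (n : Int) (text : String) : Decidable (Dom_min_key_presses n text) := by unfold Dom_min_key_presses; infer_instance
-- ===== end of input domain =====

-- ===== PORT A =====
-- Header: B reformulates A as len(text) + number of maximal runs of shift-chars among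
-- non-space characters (a groupby decomposition); same result, different decomposition.

-- shared literal predicate: char.isupper() or char in "!?$()"
def pvShift (c : Char) : Bool := PySem.Chars.isupper c || "!?$()".toList.contains c

-- A's loop body, step for step
def pvStepA (st : Int × Bool) (char : Char) : Int × Bool :=
  let presses := st.1
  let shift_on := st.2
  if pvShift char then
    let (presses, shift_on) := if ¬ shift_on then (presses + 1, true) else (presses, shift_on)
    (presses + 1, shift_on)
  else
    let shift_on := if char ≠ ' ' then false else shift_on
    (presses + 1, shift_on)

-- literal transliteration of A's toggle loop
def min_key_presses (n : Int) (text : String) : Int :=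
  (text.toList.foldl pvStepA (0, false)).1

-- ===== PORT B =====
-- groupby run-counting over the non-space characters, as in Source B:
-- state = (count of True-keyed groups so far, key of the previous element)
def pvStepB (st : Int × Option Bool) (c : Char) : Int × Option Bool :=
  let k := pvShift c
  (if some k ≠ st.2 ∧ k then st.1 + 1 else st.1, some k)

def pvGroupCount (l : List Char) : Int :=
  (l.foldl pvStepB (0, none)).1

def min_key_presses_alt (n : Int) (text : String) : Int :=
  PySem.Str.len text + pvGroupCount (text.toList.filter (fun c => c ≠ ' '))

-- ===== PRECONDITION & SPEC =====
def Spec_min_key_presses (n : Int) (text : String) (out : Int) : Prop := out = min_key_presses_alt n text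
instance (n : Int) (text : String) (out : Int) : Decidable (Spec_min_key_presses n text out) := by unfold Spec_min_key_presses; infer_instance

-- ===== CLAIM =====
def Claim_equal_min_key_presses : Prop := ∀ (n : Int) (text : String), Dom_min_key_presses n text → Spec_min_key_presses n text (min_key_presses n text)

-- ===== LEMMAS AND PROOFS =====

-- number of maximal shift-runs of l, given the previous character's key was s
def pvRuns (s : Bool) : List Char → Int
  | [] => 0
  | c :: t => (if pvShift c && !s then 1 else 0) + pvRuns (pvShift c) t

theorem pvShift_space : pvShift ' ' = false := by decide

theorem foldA_eq (l : List Char) (p : Int) (s : Bool) :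
    (l.foldl pvStepA (p, s)).1 = p + l.length + pvRuns s (l.filter (fun c => c ≠ ' ')) := by
  induction l generalizing p s with
  | nil => simp [pvRuns]
  | cons c t ih =>
    rw [List.foldl_cons]
    by_cases hc : pvShift c = true
    · have hcs : c ≠ ' ' := fun h => by simp [h, pvShift_space] at hc
      by_cases hs : s = true
      · rw [show pvStepA (p, s) c = (p + 1, s) from by simp [pvStepA, hc, hs], ih]
        simp [List.filter, hcs, pvRuns, hc, hs]; ring
      · simp only [Bool.not_eq_true] at hs
        rw [show pvStepA (p, s) c = (p + 2, true) from by simp [pvStepA, hc, hs]; ring, ih]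
        simp [List.filter, hcs, pvRuns, hc, hs]; ring
    · simp only [Bool.not_eq_true] at hc
      by_cases hsp : c = ' '
      · subst hsp
        rw [show pvStepA (p, s) ' ' = (p + 1, s) from by simp [pvStepA, pvShift_space], ih]
        simp [List.filter]; ring
      · rw [show pvStepA (p, s) c = (p + 1, false) from by simp [pvStepA, hc, hsp], ih]
        simp [List.filter, hsp, pvRuns, hc]; ring

theorem foldB_some (l : List Char) (a : Int) (b : Bool) :
    (l.foldl pvStepB (a, some b)).1 = a + pvRuns b l := by
  induction l generalizing a b with
  | nil => simp [pvRuns]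
  | cons c t ih =>
    rw [List.foldl_cons]
    by_cases hk : pvShift c = true
    · by_cases hb : b = true
      · rw [show pvStepB (a, some b) c = (a, some true) from by simp [pvStepB, hk, hb], ih]
        simp [pvRuns, hk, hb]
      · simp only [Bool.not_eq_true] at hb
        rw [show pvStepB (a, some b) c = (a + 1, some true) from by simp [pvStepB, hk, hb], ih]
        simp [pvRuns, hk, hb]; ring
    · simp only [Bool.not_eq_true] at hk
      rw [show pvStepB (a, some b) c = (a, some false) from by simp [pvStepB, hk], ih]
      simp [pvRuns, hk]

theorem pvGroupCount_eq (l : List Char) : pvGroupCount l = pvRuns false l := by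
  unfold pvGroupCount
  cases l with
  | nil => simp [pvRuns]
  | cons c t =>
    rw [List.foldl_cons]
    by_cases hk : pvShift c = true
    · rw [show pvStepB (0, none) c = (1, some true) from by simp [pvStepB, hk], foldB_some]
      simp [pvRuns, hk]
    · simp only [Bool.not_eq_true] at hk
      rw [show pvStepB (0, none) c = (0, some false) from by simp [pvStepB, hk], foldB_some]
      simp [pvRuns, hk]

-- ===== VERDICT =====
theorem min_key_presses_spec : Claim_equal_min_key_presses := by
  intro n text _
  unfold Spec_min_key_presses min_key_presses min_key_presses_alt
  rw [foldA_eq, pvGroupCount_eq]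
  simp [PySem.Str.len]
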